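-- pv_equiv track=rewrite | github.com/xiangshiyin/advent_of_code_practice | 2024/20241212/part_2.py | get_num_edges
-- ===== SOURCE A (Python) =====
-- def get_num_edges(positions, direction):
--     """
--     Given a list of positions, find the number of segments, segments are defined as connected positions, such as [(0,1), (0,2), (0,3)], or [(1,0), (2,0), (3,0)]
--     - If the direction is horizontal, find the number of segments in the horizontal direction
--     - If the direction is vertical, find the number of segments in the vertical direction
--     """
--     axis_index = 0 if direction == 'h' else 1
--     positions_sorted = sorted(positions, key=lambda x: (x[axis_index], x[1-axis_index]))
--     counter = 0
--     for i, pos in enumerate(positions_sorted):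
--         if i == 0:
--             counter += 1
--         elif pos[axis_index] != positions_sorted[i - 1][axis_index]:
--             counter += 1
--         elif pos[1-axis_index] != positions_sorted[i - 1][1-axis_index] + 1:
--             counter += 1
--     return counter
-- ===== SOURCE B (Python) =====
-- def get_num_edges(positions, direction):
--     """Count segments of consecutive positions along the given direction.
--
--     Instead of sorting and scanning neighbours, observe that each position
--     starts a new segment unless its immediate predecessor cell (same primary
--     coordinate, secondary coordinate one less) is also present; duplicates of
--     a position always start new segments.  So the answer is
--     len(positions) - (number of DISTINCT positions whose predecessor exists).
--     """
--     present = set(positions)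
--     if direction == 'h':
--         links = sum(1 for (x, y) in present if (x, y - 1) in present)
--     else:
--         links = sum(1 for (x, y) in present if (x - 1, y) in present)
--     return len(positions) - links
-- ===== Notes on version B (the rewrite author's own statement) =====
-- stated objective: faster
-- what changed: Replaces the sort-then-scan-neighbours loop by a hash-set count: the answer is len(positions) minus the number of distinct positions whose predecessor cell (one step back along the chosen axis) is also present, so no sorting and no index arithmetic.
import Mathlib
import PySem

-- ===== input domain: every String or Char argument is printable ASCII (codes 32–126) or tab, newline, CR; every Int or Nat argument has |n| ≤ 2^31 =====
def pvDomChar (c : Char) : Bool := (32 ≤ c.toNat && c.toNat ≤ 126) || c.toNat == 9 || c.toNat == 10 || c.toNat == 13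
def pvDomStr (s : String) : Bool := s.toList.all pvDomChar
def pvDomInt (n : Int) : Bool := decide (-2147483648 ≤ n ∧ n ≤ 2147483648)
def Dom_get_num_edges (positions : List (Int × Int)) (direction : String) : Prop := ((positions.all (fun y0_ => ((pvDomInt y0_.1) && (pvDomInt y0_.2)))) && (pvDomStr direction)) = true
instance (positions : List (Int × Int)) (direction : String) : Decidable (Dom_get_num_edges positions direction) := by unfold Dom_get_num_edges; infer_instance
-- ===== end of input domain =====

-- B replaces A's sort-then-scan by a set count: answer = len(positions) − #distinct positions whose
-- predecessor cell along the chosen axis is also present (no sorting; intended to be faster).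

-- ===== PORT A =====
-- pos[i] for the only indices A uses, 0 and 1 (exact there)
def pvTupGet (p : Int × Int) (i : Int) : Int := if i = 0 then p.1 else p.2

-- the body of A's for-loop over enumerate(positions_sorted) (S = positions_sorted)
def pvBodyA (S : List (Int × Int)) (ai : Int) (counter : Int) (ip : Int × (Int × Int)) : Int :=
  if ip.1 = 0 then counter + 1
  else match PySem.List.pyGet? S (ip.1 - 1) with
    | some prev =>
      if pvTupGet ip.2 ai ≠ pvTupGet prev ai then counter + 1
      else if pvTupGet ip.2 (1 - ai) ≠ pvTupGet prev (1 - ai) + 1 then counter + 1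
      else counter
    | none => counter  -- unreachable: enumerate indices i satisfy 1 ≤ i, so i-1 is in range

def get_num_edges (positions : List (Int × Int)) (direction : String) : Int :=
  let axis_index : Int := if direction = "h" then 0 else 1
  let positions_sorted := PySem.List.sorted2 positions
    (fun x => pvTupGet x axis_index) (fun x => pvTupGet x (1 - axis_index))
  (PySem.List.enumerate positions_sorted).foldl (pvBodyA positions_sorted axis_index) 0

-- ===== PORT B =====
def get_num_edges_alt (positions : List (Int × Int)) (direction : String) : Int :=
  let present : PySem.Set (Int × Int) := PySem.Set.ofList positions
  let links : Int :=
    if direction = "h" then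
      present.foldl (fun acc p => if PySem.Set.contains present (p.1, p.2 - 1) then acc + 1 else acc) 0
    else
      present.foldl (fun acc p => if PySem.Set.contains present (p.1 - 1, p.2) then acc + 1 else acc) 0
  PySem.List.len positions - links

-- ===== PRECONDITION & SPEC =====
def Spec_get_num_edges (positions : List (Int × Int)) (direction : String) (out : Int) : Prop := out = get_num_edges_alt positions direction
instance (positions : List (Int × Int)) (direction : String) (out : Int) : Decidable (Spec_get_num_edges positions direction out) := by unfold Spec_get_num_edges; infer_instance

-- ===== CLAIM (what is proved, stated in full; the proofs are below) =====
def Claim_equal_get_num_edges : Prop := ∀ (positions : List (Int × Int)) (direction : String), Dom_get_num_edges positions direction → Spec_get_num_edges positions direction (get_num_edges positions direction)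

-- ===== LEMMAS AND PROOFS =====

-- the pair of sort keys A uses, primary first
def pvKey (ai : Int) (p : Int × Int) : Int × Int := (pvTupGet p ai, pvTupGet p (1 - ai))

-- lexicographic ≤ on (primary, secondary) pairs
def pvLe (a b : Int × Int) : Prop := a.1 < b.1 ∨ (a.1 = b.1 ∧ a.2 ≤ b.2)

-- number of "linked" adjacent pairs (successor in the secondary coordinate) of prev :: l, in A's coordinates
def pvAdjFrom (ai : Int) (prev : Int × Int) : List (Int × Int) → Int
  | [] => 0
  | x :: t =>
      (if pvTupGet x ai = pvTupGet prev ai ∧ pvTupGet x (1 - ai) = pvTupGet prev (1 - ai) + 1 then 1 else 0)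
        + pvAdjFrom ai x t

-- the same count on a list of (primary, secondary) pairs
def pvAdj2 : List (Int × Int) → Int
  | [] => 0
  | [_] => 0
  | a :: b :: t => (if b.1 = a.1 ∧ b.2 = a.2 + 1 then 1 else 0) + pvAdj2 (b :: t)

lemma pvLe_trans {a b c : Int × Int} (h1 : pvLe a b) (h2 : pvLe b c) : pvLe a c := by
  unfold pvLe at *; omega

lemma pvBef_true {k1 k2 : (Int × Int) → Int} {a b : Int × Int}
    (h : (decide (k1 a < k1 b) || (!decide (k1 b < k1 a) && decide (k2 a < k2 b))) = true) :
    pvLe (k1 a, k2 a) (k1 b, k2 b) := by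
  simp [pvLe] at *; omega

lemma pvBef_false {k1 k2 : (Int × Int) → Int} {a b : Int × Int}
    (h : (decide (k1 a < k1 b) || (!decide (k1 b < k1 a) && decide (k2 a < k2 b))) = false) :
    pvLe (k1 b, k2 b) (k1 a, k2 a) := by
  simp [pvLe] at *; omega

lemma pvInsertBy_pairwise (k1 k2 : (Int × Int) → Int) (x : Int × Int) (ys : List (Int × Int))
    (h : ys.Pairwise (fun a b => pvLe (k1 a, k2 a) (k1 b, k2 b))) :
    (PySem.List.insertBy (fun a b => decide (k1 a < k1 b) || (!decide (k1 b < k1 a) && decide (k2 a < k2 b))) x ys).Pairwise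
      (fun a b => pvLe (k1 a, k2 a) (k1 b, k2 b)) := by
  induction ys with
  | nil => simp [PySem.List.insertBy]
  | cons y ys ih =>
    rw [List.pairwise_cons] at h
    obtain ⟨hy, hys⟩ := h
    by_cases hb : (decide (k1 x < k1 y) || (!decide (k1 y < k1 x) && decide (k2 x < k2 y))) = true
    · rw [PySem.List.insertBy, if_pos hb]
      refine List.pairwise_cons.2 ⟨?_, List.pairwise_cons.2 ⟨hy, hys⟩⟩
      intro z hz
      rcases List.mem_cons.1 hz with rfl | hz
      · exact pvBef_true hb
      · exact pvLe_trans (pvBef_true hb) (hy z hz)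
    · rw [PySem.List.insertBy, if_neg hb]
      refine List.pairwise_cons.2 ⟨?_, ih hys⟩
      intro z hz
      rcases (PySem.List.mem_insertBy _ _ _ _).1 hz with rfl | hz
      · exact pvBef_false (Bool.eq_false_iff.2 hb)
      · exact hy z hz

lemma pvFoldInsert_pairwise (k1 k2 : (Int × Int) → Int) (xs : List (Int × Int)) :
    ∀ acc : List (Int × Int), acc.Pairwise (fun a b => pvLe (k1 a, k2 a) (k1 b, k2 b)) →
    (xs.foldl (fun acc x => PySem.List.insertBy (fun a b => decide (k1 a < k1 b) || (!decide (k1 b < k1 a) && decide (k2 a < k2 b))) x acc) acc).Pairwise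
      (fun a b => pvLe (k1 a, k2 a) (k1 b, k2 b)) := by
  induction xs with
  | nil => intro acc h; simpa using h
  | cons x xs ih =>
    intro acc h
    rw [List.foldl_cons]
    exact ih _ (pvInsertBy_pairwise k1 k2 x acc h)

lemma pvSorted2_pairwise (xs : List (Int × Int)) (k1 k2 : (Int × Int) → Int) :
    (PySem.List.sorted2 xs k1 k2 false).Pairwise (fun a b => pvLe (k1 a, k2 a) (k1 b, k2 b)) := by
  rw [show PySem.List.sorted2 xs k1 k2 false
      = xs.foldl (fun acc x => PySem.List.insertBy (fun a b => decide (k1 a < k1 b) || (!decide (k1 b < k1 a) && decide (k2 a < k2 b))) x acc) [] from rfl]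
  exact pvFoldInsert_pairwise k1 k2 xs [] (List.Pairwise.nil)

lemma pvLoopAux (ai : Int) : ∀ (suf init : List (Int × Int)) (prev : Int × Int) (c : Int),
    (PySem.List.enumerate suf ((init.length : Int) + 1)).foldl (pvBodyA (init ++ prev :: suf) ai) c
      = c + suf.length - pvAdjFrom ai prev suf := by
  intro suf
  induction suf with
  | nil => intro init prev c; simp [PySem.List.enumerate, pvAdjFrom]
  | cons x rest ih =>
    intro init prev c
    rw [PySem.List.enumerate_cons, List.foldl_cons]
    have hget : PySem.List.pyGet? (init ++ prev :: x :: rest) ((init.length : Int) + 1 - 1) = some prev := by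
      have : ((init.length : Int) + 1 - 1) = (init.length : Int) := by ring
      rw [this]
      exact PySem.List.pyGet?_append_length ..
    have hbody : pvBodyA (init ++ prev :: x :: rest) ai c ((init.length : Int) + 1, x)
        = c + (if pvTupGet x ai = pvTupGet prev ai ∧ pvTupGet x (1 - ai) = pvTupGet prev (1 - ai) + 1 then 0 else 1) := by
      unfold pvBodyA
      rw [if_neg (by omega), hget]
      by_cases h1 : pvTupGet x ai = pvTupGet prev ai
      · by_cases h2 : pvTupGet x (1 - ai) = pvTupGet prev (1 - ai) + 1
        · simp [h1, h2]
        · simp [h1, h2]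
      · simp [h1]
    rw [hbody]
    have hstep := ih (init ++ [prev]) x (c + (if pvTupGet x ai = pvTupGet prev ai ∧ pvTupGet x (1 - ai) = pvTupGet prev (1 - ai) + 1 then 0 else 1))
    rw [List.append_assoc] at hstep
    simp only [List.cons_append, List.nil_append] at hstep
    have hlen : (((init ++ [prev]).length : Int) + 1) = ((init.length : Int) + 1) + 1 := by
      simp [List.length_append]
    rw [hlen] at hstep
    rw [hstep]
    rw [pvAdjFrom]
    simp only [List.length_cons]
    split_ifs <;> push_cast <;> omega

lemma pvLoopA (ai : Int) (S : List (Int × Int)) :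
    (PySem.List.enumerate S).foldl (pvBodyA S ai) 0
      = (S.length : Int) - (match S with | [] => 0 | a :: t => pvAdjFrom ai a t) := by
  cases S with
  | nil => simp [PySem.List.enumerate]
  | cons a t =>
    rw [PySem.List.enumerate_cons, List.foldl_cons]
    have hbody : pvBodyA (a :: t) ai 0 (0, a) = 1 := by simp [pvBodyA]
    rw [hbody]
    have : (0 : Int) + 1 = ((([] : List (Int × Int)).length : Int) + 1) := by simp
    rw [this, show (a :: t) = ([] : List (Int × Int)) ++ a :: t from rfl, pvLoopAux ai t [] a 1]
    simp only [List.nil_append, List.length_cons]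
    push_cast
    ring

lemma pvAdjFrom_map (ai : Int) (prev : Int × Int) (l : List (Int × Int)) :
    pvAdjFrom ai prev l = pvAdj2 (pvKey ai prev :: l.map (pvKey ai)) := by
  induction l generalizing prev with
  | nil => simp [pvAdjFrom, pvAdj2]
  | cons x t ih => simp [pvAdjFrom, pvAdj2, pvKey, ih x]

lemma pvCore : ∀ (L : List (Int × Int)), L.Pairwise pvLe →
    pvAdj2 L = ((L.toFinset.filter (fun e => (e.1, e.2 - 1) ∈ L.toFinset)).card : Int) := by
  intro L
  induction L with
  | nil => intro _; simp [pvAdj2]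
  | cons a t ih =>
    cases t with
    | nil =>
      intro _
      simp only [pvAdj2, List.toFinset_cons, List.toFinset_nil, insert_empty_eq]
      rw [Finset.filter_singleton, if_neg (by simp [Prod.ext_iff])]
      simp
    | cons b t' =>
      intro hs
      rw [List.pairwise_cons] at hs
      obtain ⟨ha, htail⟩ := hs
      have hab : pvLe a b := ha b (by simp)
      have hbx : ∀ x ∈ t', pvLe b x := (List.pairwise_cons.1 htail).1
      have ihv := ih htail
      by_cases heq : a = b
      · subst heq
        have hset : (a :: a :: t').toFinset = (a :: t').toFinset := by
          simp [List.toFinset_cons]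
        rw [pvAdj2, hset, if_neg (by simp)]
        rw [ihv]; ring
      · have hanot : a ∉ b :: t' := by
          intro hm
          rcases List.mem_cons.1 hm with rfl | hm
          · exact heq rfl
          · have h1 : pvLe b a := hbx a hm
            have : a = b := by unfold pvLe at hab h1; rw [Prod.ext_iff]; omega
            exact heq this
        have hT : (a :: b :: t').toFinset = insert a ((b :: t').toFinset) := by
          simp [List.toFinset_cons]
        set S := (b :: t').toFinset with hS
        have hastep : ∀ x ∈ b :: t', pvLe a x := ha
        -- the head can never have its predecessor present
        have hPa : ((a.1, a.2 - 1) ∈ insert a S) = False := by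
          simp only [Finset.mem_insert, eq_iff_iff, iff_false]
          rintro (h | h)
          · rw [Prod.ext_iff] at h; omega
          · rw [hS, List.mem_toFinset] at h
            have := hastep _ h
            unfold pvLe at this; omega
        have h1 : (insert a S).filter (fun e => (e.1, e.2 - 1) ∈ insert a S)
            = S.filter (fun e => (e.1, e.2 - 1) ∈ insert a S) := by
          rw [Finset.filter_insert, if_neg (by simp [hPa])]
        rw [pvAdj2, hT, h1]
        by_cases hb : b = (a.1, a.2 + 1)
        · have hfe : S.filter (fun e => (e.1, e.2 - 1) ∈ insert a S)
              = insert b (S.filter (fun e => (e.1, e.2 - 1) ∈ S)) := by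
            ext e
            simp only [Finset.mem_filter, Finset.mem_insert]
            constructor
            · rintro ⟨heS, hpre | hpre⟩
              · left
                rw [Prod.ext_iff] at hpre ⊢
                rw [hb]; simp; omega
              · exact Or.inr ⟨heS, hpre⟩
            · rintro (rfl | ⟨heS, hpre⟩)
              · refine ⟨by rw [hS]; simp, ?_⟩
                left
                rw [hb, Prod.ext_iff]; simp
              · exact ⟨heS, Or.inr hpre⟩
          have hbnot : b ∉ S.filter (fun e => (e.1, e.2 - 1) ∈ S) := by
            simp only [Finset.mem_filter, not_and]
            intro _ hpre
            rw [hS, List.mem_toFinset] at hpre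
            have hb1 : (b.1, b.2 - 1) = a := by rw [hb, Prod.ext_iff]; simp
            rw [hb1] at hpre
            exact hanot hpre
          rw [hfe, Finset.card_insert_of_notMem hbnot, if_pos (by rw [hb]; simp)]
          rw [ihv]; push_cast; ring
        · have hsucc : (a.1, a.2 + 1) ∉ b :: t' := by
            intro hm
            rcases List.mem_cons.1 hm with h | hm
            · exact hb h.symm
            · have h1 := hbx _ hm
              unfold pvLe at h1 hab
              rw [Prod.ext_iff] at heq hb
              simp at h1 heq hb
              omega
          have hfe : S.filter (fun e => (e.1, e.2 - 1) ∈ insert a S)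
              = S.filter (fun e => (e.1, e.2 - 1) ∈ S) := by
            apply Finset.filter_congr
            intro e heS
            simp only [Finset.mem_insert]
            constructor
            · rintro (hpre | hpre)
              · exfalso
                have : e = (a.1, a.2 + 1) := by rw [Prod.ext_iff] at hpre ⊢; omega
                rw [hS, List.mem_toFinset] at heS
                rw [this] at heS
                exact hsucc heS
              · exact hpre
            · exact Or.inr
          rw [hfe, if_neg (by simpa [Prod.ext_iff] using hb)]
          rw [ihv]; ring

lemma pvB_count (positions : List (Int × Int)) (g : (Int × Int) → Int × Int) (ai : Int)
    (hinj : Function.Injective (pvKey ai))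
    (hfg : ∀ p, pvKey ai (g p) = ((pvKey ai p).1, (pvKey ai p).2 - 1)) :
    ((PySem.Set.ofList positions).countP (fun p => PySem.Set.contains (PySem.Set.ofList positions) (g p)))
      = (((positions.map (pvKey ai)).toFinset.filter
            (fun e => (e.1, e.2 - 1) ∈ (positions.map (pvKey ai)).toFinset)).card) := by
  set s := PySem.Set.ofList positions with hs
  set M := positions.map (pvKey ai) with hM
  set q : (Int × Int) → Bool := fun e => decide ((e.1, e.2 - 1) ∈ M.toFinset) with hq
  have hpt : ∀ p, (fun p => PySem.Set.contains s (g p)) p = (q ∘ pvKey ai) p := by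
    intro p
    simp only [Function.comp, hq]
    rw [Bool.eq_iff_iff, PySem.Set.contains_iff, decide_eq_true_eq, ← hfg p,
      List.mem_toFinset, hM, List.mem_map_of_injective hinj, hs, PySem.Set.mem_ofList]
  have h1 : s.countP (fun p => PySem.Set.contains s (g p)) = s.countP (q ∘ pvKey ai) :=
    List.countP_congr (fun p _ => by rw [show s.contains (g p) = (q ∘ pvKey ai) p from hpt p])
  rw [h1, ← List.countP_map]
  have hnd : (s.map (pvKey ai)).Nodup := List.Nodup.map hinj (by rw [hs]; exact PySem.Set.nodup_ofList positions)
  have hmemeq : (s.map (pvKey ai)).toFinset = M.toFinset := by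
    ext z
    simp only [List.mem_toFinset, List.mem_map, hM]
    constructor
    · rintro ⟨p, hp, rfl⟩
      exact ⟨p, by rw [hs] at hp; exact (PySem.Set.mem_ofList positions p).1 hp, rfl⟩
    · rintro ⟨p, hp, rfl⟩
      exact ⟨p, by rw [hs]; exact (PySem.Set.mem_ofList positions p).2 hp, rfl⟩
  rw [List.countP_eq_length_filter, ← List.toFinset_card_of_nodup (List.Nodup.filter _ hnd),
    List.toFinset_filter, hmemeq]
  simp [hq]

lemma pvAdjMatch (ai : Int) (L : List (Int × Int)) :
    (match L with | [] => (0 : Int) | a :: t => pvAdjFrom ai a t) = pvAdj2 (L.map (pvKey ai)) := by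
  cases L with
  | nil => simp [pvAdj2]
  | cons a t => simp only []; rw [pvAdjFrom_map]; simp

lemma pvMain (positions : List (Int × Int)) (ai : Int) (g : (Int × Int) → Int × Int)
    (hinj : Function.Injective (pvKey ai))
    (hfg : ∀ p, pvKey ai (g p) = ((pvKey ai p).1, (pvKey ai p).2 - 1)) :
    (PySem.List.enumerate (PySem.List.sorted2 positions (fun x => pvTupGet x ai) (fun x => pvTupGet x (1 - ai)))).foldl
        (pvBodyA (PySem.List.sorted2 positions (fun x => pvTupGet x ai) (fun x => pvTupGet x (1 - ai))) ai) 0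
      = PySem.List.len positions
        - ((PySem.Set.ofList positions).foldl
            (fun acc p => if PySem.Set.contains (PySem.Set.ofList positions) (g p) then acc + 1 else acc) 0) := by
  set S := PySem.List.sorted2 positions (fun x => pvTupGet x ai) (fun x => pvTupGet x (1 - ai)) with hSdef
  have hperm : S.Perm positions := PySem.List.sorted2_perm ..
  -- A's loop counts length minus linked adjacent pairs of the sorted list
  rw [pvLoopA ai S]
  -- the adjacency count, moved to (primary, secondary) pairs
  rw [pvAdjMatch ai S]
  -- the sorted mapped list is lexicographically nondecreasing
  have hpw : (S.map (pvKey ai)).Pairwise pvLe := by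
    rw [List.pairwise_map]
    exact pvSorted2_pairwise positions _ _
  rw [pvCore _ hpw]
  -- B's loop is a countP over the set, which is the same Finset count
  rw [PySem.List.foldl_if_add_one, pvB_count positions g ai hinj hfg]
  have hfeq : (S.map (pvKey ai)).toFinset = (positions.map (pvKey ai)).toFinset :=
    List.toFinset_eq_of_perm _ _ (hperm.map _)
  rw [hfeq, PySem.List.len_eq, hperm.length_eq]
  ring

-- ===== VERDICT (by name: the statement is the Claim_ definition above) =====
theorem get_num_edges_spec : Claim_equal_get_num_edges := by
  intro positions direction _
  unfold Spec_get_num_edges get_num_edges get_num_edges_alt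
  by_cases h : direction = "h" <;> simp only [h, if_pos, ite_false]
  · exact pvMain positions 0 (fun p => (p.1, p.2 - 1))
      (by intro a b hab; simpa [pvKey, pvTupGet, Prod.ext_iff] using hab)
      (by intro p; simp [pvKey, pvTupGet])
  · exact pvMain positions 1 (fun p => (p.1 - 1, p.2))
      (by intro a b hab; simpa [pvKey, pvTupGet, Prod.ext_iff, and_comm] using hab)
      (by intro p; simp [pvKey, pvTupGet])
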